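-- pv_equiv track=rewrite | github.com/dougwinr/ds-eval | src/pages/ask_test.py | determine_career_level
-- ===== SOURCE A (Python) =====
-- def determine_career_level(weighted_score, pillar_scores, selected_track):
--     """Determine career level based on scores and track requirements"""
--
--     # Career level thresholds
--     level_thresholds = {
--         'Intern': 20,
--         'Junior': 40,
--         'Mid': 60,
--         'Senior': 80,
--         'Specialist': 90,
--         'Manager': 85,  # Different track
--         'PM': 80  # Different track
--     }
--
--     # Determine level based on weighted score
--     if weighted_score >= level_thresholds['Specialist']:
--         level = 'Specialist'
--     elif weighted_score >= level_thresholds['Senior']: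
--         level = 'Senior'
--     elif weighted_score >= level_thresholds['Mid']:
--         level = 'Mid'
--     elif weighted_score >= level_thresholds['Junior']:
--         level = 'Junior'
--     elif weighted_score >= level_thresholds['Intern']:
--         level = 'Intern'
--     else:
--         level = 'Intern'
--
--     # Check if meets minimum requirements for the level
--     if selected_track:
--         minimums = selected_track.get('minimums', {})
--         for pillar, score in pillar_scores.items():
--             minimum = minimums.get(pillar, 0)
--             if score < minimum:
--                 # Downgrade level if doesn't meet minimums
--                 if level == 'Specialist':
--                     level = 'Senior'
--                 elif level == 'Senior':
--                     level = 'Mid'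
--                 elif level == 'Mid':
--                     level = 'Junior'
--                 elif level == 'Junior':
--                     level = 'Intern'
--                 break
--
--     return level
-- ===== SOURCE B (Python) =====
-- def determine_career_level(weighted_score, pillar_scores, selected_track):
--     """Determine career level based on scores and track requirements"""
--     levels = ['Intern', 'Junior', 'Mid', 'Senior', 'Specialist']
--     cuts = [40, 60, 80, 90]  # levels[i] (i>=1) requires weighted_score >= cuts[i-1]
--     # binary search (bisect_right): idx = number of cutoffs <= weighted_score
--     lo, hi = 0, len(cuts)
--     while lo < hi:
--         mid = (lo + hi) // 2
--         if weighted_score >= cuts[mid]: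
--             lo = mid + 1
--         else:
--             hi = mid
--     idx = lo
--     if selected_track:
--         minimums = selected_track.get('minimums', {})
--         if any(score < minimums.get(pillar, 0) for pillar, score in pillar_scores.items()):
--             idx -= 1
--     return levels[max(idx, 0)]
-- ===== Notes on version B (the rewrite author's own statement) =====
-- stated objective: alternative
-- what changed: A hand-written binary search (bisect_right) over the sorted cutoff list [40,60,80,90] replaces A's descending if/elif threshold chain, and the minimums downgrade becomes index arithmetic (idx-1 clamped at 0) driven by one any() predicate instead of A's break-loop with a per-level if/elif demotion chain.
import Mathlib
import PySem

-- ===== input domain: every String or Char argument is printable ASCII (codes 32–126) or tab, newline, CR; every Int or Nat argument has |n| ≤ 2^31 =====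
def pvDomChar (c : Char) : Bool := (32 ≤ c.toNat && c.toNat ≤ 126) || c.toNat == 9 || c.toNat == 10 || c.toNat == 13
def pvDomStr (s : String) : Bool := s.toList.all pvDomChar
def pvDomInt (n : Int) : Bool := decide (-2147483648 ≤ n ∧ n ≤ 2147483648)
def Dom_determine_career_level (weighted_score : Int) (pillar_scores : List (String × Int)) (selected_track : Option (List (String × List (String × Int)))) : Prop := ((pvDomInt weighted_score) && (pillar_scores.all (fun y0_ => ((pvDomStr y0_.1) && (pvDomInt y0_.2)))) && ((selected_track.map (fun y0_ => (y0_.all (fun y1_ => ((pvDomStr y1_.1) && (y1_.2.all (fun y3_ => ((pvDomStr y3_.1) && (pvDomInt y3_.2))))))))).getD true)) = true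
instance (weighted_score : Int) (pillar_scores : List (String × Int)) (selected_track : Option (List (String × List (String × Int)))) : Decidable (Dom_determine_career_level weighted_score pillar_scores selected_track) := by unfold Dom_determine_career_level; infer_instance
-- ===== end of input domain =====

-- B replaces A's if/elif threshold chain by a hand-written binary search (bisect_right)
-- over the sorted cutoff list, and A's break-loop demotion chain by index arithmetic
-- (idx-1 clamped at 0) driven by a single any() predicate (alternative algorithm).

-- ===== PORT A =====
-- the 'for pillar, score in pillar_scores.items(): … break' loop of A
def dclA_loop (minimums : PySem.Dict String Int) (level : String) : List (String × Int) → String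
  | [] => level
  | (pillar, score) :: rest =>
    let minimum := minimums.getD pillar 0
    if score < minimum then
      -- the downgrade chain, then break
      if level = "Specialist" then "Senior"
      else if level = "Senior" then "Mid"
      else if level = "Mid" then "Junior"
      else if level = "Junior" then "Intern"
      else level
    else dclA_loop minimums level rest

def determine_career_level (weighted_score : Int) (pillar_scores : List (String × Int)) (selected_track : Option (List (String × List (String × Int)))) : String :=
  let level_thresholds : PySem.Dict String Int :=
    PySem.Dict.ofList [("Intern",20),("Junior",40),("Mid",60),("Senior",80),("Specialist",90),("Manager",85),("PM",80)]
  -- level_thresholds['X'] : the key is always present, so get? … |>.getD 0 is exact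
  let level :=
    if weighted_score ≥ (level_thresholds.get? "Specialist").getD 0 then "Specialist"
    else if weighted_score ≥ (level_thresholds.get? "Senior").getD 0 then "Senior"
    else if weighted_score ≥ (level_thresholds.get? "Mid").getD 0 then "Mid"
    else if weighted_score ≥ (level_thresholds.get? "Junior").getD 0 then "Junior"
    else if weighted_score ≥ (level_thresholds.get? "Intern").getD 0 then "Intern"
    else "Intern"
  match selected_track with
  | none => level                       -- 'if selected_track:' — None is falsy
  | some track =>
    if track ≠ [] then                  -- an empty dict is falsy too
      let minimums := (PySem.Dict.mk track).getD "minimums" []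
      dclA_loop (PySem.Dict.mk minimums) level pillar_scores
    else level

-- ===== PORT B =====
-- 'while lo < hi: mid = (lo+hi)//2; …' — binary search (bisect_right); lo, hi stay ≥ 0 so Nat is exact
def dclB_bs (ws : Int) (cuts : List Int) (lo hi : Nat) : Nat :=
  if _h : lo < hi then
    let mid := (lo + hi) / 2
    if ws ≥ (PySem.List.pyGet? cuts (mid : Int)).getD 0 then dclB_bs ws cuts (mid + 1) hi
    else dclB_bs ws cuts lo mid
  else lo
termination_by hi - lo
decreasing_by all_goals omega

def determine_career_level_alt (weighted_score : Int) (pillar_scores : List (String × Int)) (selected_track : Option (List (String × List (String × Int)))) : String :=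
  let levels : List String := ["Intern", "Junior", "Mid", "Senior", "Specialist"]
  let cuts : List Int := [40, 60, 80, 90]
  let idx : Int := (dclB_bs weighted_score cuts 0 cuts.length : Int)
  let idx' : Int :=
    match selected_track with
    | none => idx
    | some track =>
      if track ≠ [] then
        let minimums := (PySem.Dict.mk track).getD "minimums" []
        if pillar_scores.any (fun p => p.2 < (PySem.Dict.mk minimums).getD p.1 0)
        then idx - 1 else idx
      else idx
  (PySem.List.pyGet? levels (max idx' 0)).getD ""

-- ===== PRECONDITION & SPEC =====
def Spec_determine_career_level (weighted_score : Int) (pillar_scores : List (String × Int)) (selected_track : Option (List (String × List (String × Int)))) (out : String) : Prop := out = determine_career_level_alt weighted_score pillar_scores selected_track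
instance (weighted_score : Int) (pillar_scores : List (String × Int)) (selected_track : Option (List (String × List (String × Int)))) (out : String) : Decidable (Spec_determine_career_level weighted_score pillar_scores selected_track out) := by unfold Spec_determine_career_level; infer_instance

-- ===== CLAIM =====
def Claim_equal_determine_career_level : Prop := ∀ (weighted_score : Int) (pillar_scores : List (String × Int)) (selected_track : Option (List (String × List (String × Int)))), Dom_determine_career_level weighted_score pillar_scores selected_track → Spec_determine_career_level weighted_score pillar_scores selected_track (determine_career_level weighted_score pillar_scores selected_track)

-- ===== LEMMAS AND PROOFS =====

-- A's break-loop downgrades (once) iff some pillar is below its minimum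
theorem dclA_loop_eq_any (minimums : PySem.Dict String Int) (level : String) (ps : List (String × Int)) :
    dclA_loop minimums level ps =
      if ps.any (fun p => p.2 < minimums.getD p.1 0) then
        (if level = "Specialist" then "Senior"
         else if level = "Senior" then "Mid"
         else if level = "Mid" then "Junior"
         else if level = "Junior" then "Intern"
         else level)
      else level := by
  induction ps with
  | nil => simp [dclA_loop]
  | cons p rest ih =>
    obtain ⟨pillar, score⟩ := p
    simp only [dclA_loop, List.any_cons]
    by_cases h : score < minimums.getD pillar 0
    · simp [h]
    · rw [if_neg h, ih]
      simp only [decide_eq_false h, Bool.false_or]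

-- B's binary search on the concrete cutoffs, fully evaluated
theorem dclB_bs_eval (ws : Int) :
    dclB_bs ws [40, 60, 80, 90] 0 (([40, 60, 80, 90] : List Int).length) =
      if ws ≥ 90 then 4 else if ws ≥ 80 then 3 else if ws ≥ 60 then 2
      else if ws ≥ 40 then 1 else 0 := by
  by_cases h90 : ws ≥ 90 <;> by_cases h80 : ws ≥ 80 <;> by_cases h60 : ws ≥ 60 <;>
    by_cases h40 : ws ≥ 40 <;>
    first
      | omega
      | simp [dclB_bs, PySem.List.pyGet?, PySem.List.pyIdx?, h90, h80, h60, h40]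

-- ===== VERDICT =====
set_option maxHeartbeats 1000000 in
theorem determine_career_level_spec : Claim_equal_determine_career_level := by
  intro ws ps st hdom
  clear hdom
  show determine_career_level ws ps st = determine_career_level_alt ws ps st
  have t90 : ((PySem.Dict.ofList [("Intern",(20:Int)),("Junior",40),("Mid",60),("Senior",80),("Specialist",90),("Manager",85),("PM",80)]).get? "Specialist").getD 0 = 90 := by decide
  have t80 : ((PySem.Dict.ofList [("Intern",(20:Int)),("Junior",40),("Mid",60),("Senior",80),("Specialist",90),("Manager",85),("PM",80)]).get? "Senior").getD 0 = 80 := by decide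
  have t60 : ((PySem.Dict.ofList [("Intern",(20:Int)),("Junior",40),("Mid",60),("Senior",80),("Specialist",90),("Manager",85),("PM",80)]).get? "Mid").getD 0 = 60 := by decide
  have t40 : ((PySem.Dict.ofList [("Intern",(20:Int)),("Junior",40),("Mid",60),("Senior",80),("Specialist",90),("Manager",85),("PM",80)]).get? "Junior").getD 0 = 40 := by decide
  have t20 : ((PySem.Dict.ofList [("Intern",(20:Int)),("Junior",40),("Mid",60),("Senior",80),("Specialist",90),("Manager",85),("PM",80)]).get? "Intern").getD 0 = 20 := by decide
  cases st with
  | none =>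
      simp only [determine_career_level, determine_career_level_alt, dclB_bs_eval,
        t90, t80, t60, t40, t20]
      clear t90 t80 t60 t40 t20
      by_cases h90 : ws ≥ 90 <;> by_cases h80 : ws ≥ 80 <;> by_cases h60 : ws ≥ 60 <;>
        by_cases h40 : ws ≥ 40 <;>
        first | omega | simp [h90, h80, h60, h40, PySem.List.pyGet?, PySem.List.pyIdx?]
  | some track =>
      by_cases ht : track = []
      · subst ht
        simp only [determine_career_level, determine_career_level_alt, dclB_bs_eval,
          t90, t80, t60, t40, t20]
        clear t90 t80 t60 t40 t20
        by_cases h90 : ws ≥ 90 <;> by_cases h80 : ws ≥ 80 <;> by_cases h60 : ws ≥ 60 <;>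
          by_cases h40 : ws ≥ 40 <;>
          first | omega | simp [h90, h80, h60, h40, PySem.List.pyGet?, PySem.List.pyIdx?]
      · simp only [determine_career_level, determine_career_level_alt, dclB_bs_eval,
          t90, t80, t60, t40, t20, dclA_loop_eq_any]
        clear t90 t80 t60 t40 t20
        rw [if_pos ht, if_pos ht]
        generalize (ps.any (fun p => p.2 < ((PySem.Dict.mk ((PySem.Dict.mk track).getD "minimums" [])).getD p.1 0)) : Bool) = b
        cases b <;>
        by_cases h90 : ws ≥ 90 <;> by_cases h80 : ws ≥ 80 <;> by_cases h60 : ws ≥ 60 <;>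
          by_cases h40 : ws ≥ 40 <;>
          first | omega | simp [h90, h80, h60, h40, PySem.List.pyGet?, PySem.List.pyIdx?]
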